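-- pv_equiv track=rewrite | github.com/cybertronai/ByteDMD-definition | experiments/grid/algorithms.py | make_volume
-- ===== SOURCE A (Python) =====
-- def make_volume(rows: int, cols: int, channels: int, offset: int = 0) -> list[list[list[int]]]:
--     return [
--         [
--             [offset + ((i * cols + j) * channels + c) + 1 for c in range(channels)]
--             for j in range(cols)
--         ]
--         for i in range(rows)
--     ]
-- ===== SOURCE B (Python) =====
-- def make_volume(rows: int, cols: int, channels: int, offset: int = 0) -> list[list[list[int]]]:
--     flat = range(offset + 1, offset + rows * cols * channels + 1)
--     out = []
--     pos = 0
--     for _ in range(rows):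
--         row = []
--         for _ in range(cols):
--             row.append(list(flat[pos:pos + channels]))
--             pos += channels
--         out.append(row)
--     return out
-- ===== Notes on version B (the rewrite author's own statement) =====
-- stated objective: alternative
-- what changed: B builds the flat run of consecutive integers offset+1..offset+rows*cols*channels once and partitions it into channel-sized slices with a running position, instead of recomputing ((i*cols+j)*channels+c)+1 for every cell via three nested comprehensions.
import Mathlib
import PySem

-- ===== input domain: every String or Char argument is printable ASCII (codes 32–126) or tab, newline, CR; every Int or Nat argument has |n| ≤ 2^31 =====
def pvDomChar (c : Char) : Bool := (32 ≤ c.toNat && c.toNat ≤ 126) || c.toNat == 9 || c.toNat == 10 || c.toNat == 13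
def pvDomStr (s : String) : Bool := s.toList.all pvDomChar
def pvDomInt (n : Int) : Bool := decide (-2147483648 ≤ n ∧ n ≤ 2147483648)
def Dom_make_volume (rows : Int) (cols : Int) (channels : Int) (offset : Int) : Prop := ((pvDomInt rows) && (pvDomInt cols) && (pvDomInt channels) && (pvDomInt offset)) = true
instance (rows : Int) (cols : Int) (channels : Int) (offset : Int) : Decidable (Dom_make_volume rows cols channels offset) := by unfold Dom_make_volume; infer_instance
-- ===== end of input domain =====

-- B builds the flat run of consecutive integers once and slices it into channel-sized
-- chunks with a running position, instead of per-cell index arithmetic (objective: alternative).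

-- ===== PORT A =====
def make_volume (rows : Int) (cols : Int) (channels : Int) (offset : Int) : List (List (List Int)) :=
  (PySem.List.pyRange 0 rows 1).map (fun i =>
    (PySem.List.pyRange 0 cols 1).map (fun j =>
      (PySem.List.pyRange 0 channels 1).map (fun c =>
        offset + ((i * cols + j) * channels + c) + 1)))

-- ===== PORT B =====
-- Source B keeps `flat` as a lazy range object; its O(1) slice `list(flat[a:b])` is ported
-- exactly (Python's slice-index clamping via PySem.List.clampIdx on the range's bounds).
def rangeSlice (start : Int) (stop : Int) (a : Int) (b : Int) : List Int :=
  let len := (stop - start).toNat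
  let i := PySem.List.clampIdx len a
  let j := PySem.List.clampIdx len b
  PySem.List.pyRange (start + (i : Int)) (start + (j : Int)) 1

def make_volume_alt (rows : Int) (cols : Int) (channels : Int) (offset : Int) : List (List (List Int)) :=
  let start := offset + 1
  let stop := offset + rows * cols * channels + 1
  let res := (PySem.List.pyRange 0 rows 1).foldl
    (fun (st : Int × List (List (List Int))) _ =>
      let inner := (PySem.List.pyRange 0 cols 1).foldl
        (fun (st2 : Int × List (List Int)) _ =>
          (st2.1 + channels,
           st2.2 ++ [rangeSlice start stop st2.1 (st2.1 + channels)]))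
        (st.1, [])
      (inner.1, st.2 ++ [inner.2]))
    (0, [])
  res.2

-- ===== PRECONDITION & SPEC =====
def Spec_make_volume (rows : Int) (cols : Int) (channels : Int) (offset : Int) (out : List (List (List Int))) : Prop := out = make_volume_alt rows cols channels offset
instance (rows : Int) (cols : Int) (channels : Int) (offset : Int) (out : List (List (List Int))) : Decidable (Spec_make_volume rows cols channels offset out) := by unfold Spec_make_volume; infer_instance

-- ===== CLAIM (what is proved, stated in full; the proofs are below) =====
def Claim_equal_make_volume : Prop := ∀ (rows : Int) (cols : Int) (channels : Int) (offset : Int), Dom_make_volume rows cols channels offset → Spec_make_volume rows cols channels offset (make_volume rows cols channels offset)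

-- ===== LEMMAS AND PROOFS =====

-- a window of List.range, as a shifted List.range
theorem take_drop_range (P H N : ℕ) (h : P + H ≤ N) :
    List.take H (List.drop P (List.range N)) = (List.range H).map (fun k => P + k) := by
  rw [List.range_eq_range', List.drop_range', List.take_range'_of_length_ge (by omega)]
  simp [List.range'_eq_map_range]

-- the arithmetic slice of a lazy range equals the list slice of the materialised range
theorem rangeSlice_eq (start stop a b : Int) :
    rangeSlice start stop a b
    = PySem.List.slice (PySem.List.pyRange start stop 1) (some a) (some b) := by
  unfold rangeSlice
  simp only [PySem.List.slice, PySem.List.length_pyRange_one]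
  set len := (stop - start).toNat with hlen
  set i := PySem.List.clampIdx len a with hi
  set j := PySem.List.clampIdx len b with hj
  have hil : i ≤ len := PySem.List.clampIdx_le len a
  have hjl : j ≤ len := PySem.List.clampIdx_le len b
  rw [PySem.List.pyRange_one, PySem.List.pyRange_one,
    show (start + (j : Int) - (start + (i : Int))).toNat = j - i from by omega,
    show (stop - start).toNat = len from rfl,
    ← List.map_drop, ← List.map_take, take_drop_range i (j - i) len (by omega), List.map_map]
  apply List.map_congr_left
  intro k _
  simp only [Function.comp_apply]
  push_cast
  ring

-- inner-loop invariant: appending one slice per iteration, advancing the position by `channels`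
theorem inner_fold_eq (flat : List Int) (channels : Int) :
    ∀ (l : List Int) (st : Int × List (List Int)),
    l.foldl
      (fun (st2 : Int × List (List Int)) _ =>
        (st2.1 + channels,
         st2.2 ++ [PySem.List.slice flat (some st2.1) (some (st2.1 + channels))]))
      st
    = (st.1 + l.length * channels,
       st.2 ++ (List.range l.length).map (fun (k : ℕ) =>
         PySem.List.slice flat (some (st.1 + (k : Int) * channels)) (some (st.1 + (k : Int) * channels + channels)))) := by
  intro l
  induction l with
  | nil => intro st; simp
  | cons x t ih =>
    intro st
    rw [List.foldl_cons, ih]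
    simp only [List.length_cons, List.range_succ_eq_map, List.map_cons, List.map_map,
      Prod.mk.injEq, Nat.cast_zero, zero_mul, add_zero, List.append_assoc,
      List.singleton_append]
    constructor
    · push_cast; ring
    · congr 1
      congr 1
      apply List.map_congr_left
      intro k _
      simp only [Function.comp_apply]
      congr 2 <;> push_cast <;> ring

-- outer-loop invariant, with the inner loop already summarised by inner_fold_eq
theorem outer_fold_eq (flat : List Int) (channels : Int) (m : List Int) :
    ∀ (l : List Int) (st : Int × List (List (List Int))),
    l.foldl
      (fun (st : Int × List (List (List Int))) _ =>
        let inner := m.foldl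
          (fun (st2 : Int × List (List Int)) _ =>
            (st2.1 + channels,
             st2.2 ++ [PySem.List.slice flat (some st2.1) (some (st2.1 + channels))]))
          (st.1, [])
        (inner.1, st.2 ++ [inner.2]))
      st
    = (st.1 + l.length * (m.length * channels),
       st.2 ++ (List.range l.length).map (fun (i : ℕ) =>
         (List.range m.length).map (fun (j : ℕ) =>
           PySem.List.slice flat
             (some (st.1 + (i : Int) * (m.length * channels) + (j : Int) * channels))
             (some (st.1 + (i : Int) * (m.length * channels) + (j : Int) * channels + channels))))) := by
  intro l
  induction l with
  | nil => intro st; simp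
  | cons x t ih =>
    intro st
    rw [List.foldl_cons, ih]
    simp only [inner_fold_eq, List.length_cons, List.range_succ_eq_map, List.map_cons,
      List.map_map, Prod.mk.injEq, Nat.cast_zero, zero_mul, add_zero, List.append_assoc,
      List.singleton_append, List.nil_append]
    refine ⟨by push_cast; ring, ?_⟩
    congr 1
    congr 1
    apply List.map_congr_left
    intro i _
    simp only [Function.comp_apply]
    apply List.map_congr_left
    intro j _
    congr 2 <;> first
      | rfl
      | (simp only [Option.some.injEq]; push_cast; ring)
      | (push_cast; ring)

-- the slice of the flat run at position (i*C + j)*H is exactly A's innermost list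
theorem slice_flat_eq (rows cols channels offset : Int)
    (hr : 0 < rows) (hc : 0 < cols)
    (i j : ℕ) (hi : i < rows.toNat) (hj : j < cols.toNat) :
    PySem.List.slice (PySem.List.pyRange (offset + 1) (offset + rows * cols * channels + 1) 1)
      (some (((i : Int) * (cols.toNat * channels) + (j : Int) * channels)))
      (some (((i : Int) * (cols.toNat * channels) + (j : Int) * channels + channels)))
    = (PySem.List.pyRange 0 channels 1).map (fun c =>
        offset + (((i : Int) * cols + (j : Int)) * channels + c) + 1) := by
  by_cases hch : channels ≤ 0
  · -- channels ≤ 0: flat is empty and the slice of [] is []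
    have hN : offset + rows * cols * channels + 1 ≤ offset + 1 := by nlinarith [mul_pos hr hc]
    rw [PySem.List.pyRange_one_eq_nil hN, PySem.List.pyRange_one_eq_nil hch]
    simp [PySem.List.slice]
  · -- main case: all dimensions positive
    push_neg at hch
    set R := rows.toNat with hR
    set C := cols.toNat with hC
    set H := channels.toNat with hH
    have hcols : (C : Int) = cols := Int.toNat_of_nonneg hc.le
    have hchn : (H : Int) = channels := Int.toNat_of_nonneg hch.le
    have hrown : (R : Int) = rows := Int.toNat_of_nonneg hr.le
    have hN : (offset + rows * cols * channels + 1) - (offset + 1) = ((R * C * H : ℕ) : Int) := by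
      push_cast [hcols, hchn, hrown]; ring
    have hflat : PySem.List.pyRange (offset + 1) (offset + rows * cols * channels + 1) 1
        = (List.range (R * C * H)).map (fun (k : ℕ) => offset + 1 + (k : Int)) := by
      rw [PySem.List.pyRange_one, hN, Int.toNat_natCast]
    set P : ℕ := (i * C + j) * H with hP
    have harg1 : (i : Int) * (cols.toNat * channels) + (j : Int) * channels = ((P : ℕ) : Int) := by
      push_cast [hP, ← hchn]; ring
    have harg2 : ((P : ℕ) : Int) + channels = ((P : ℕ) : Int) + ((H : ℕ) : Int) := by
      rw [hchn]
    have hPH : P + H ≤ R * C * H := by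
      have h1 : i * C + j + 1 ≤ R * C := by
        calc i * C + j + 1 ≤ i * C + C := by omega
        _ = (i + 1) * C := by ring
        _ ≤ R * C := Nat.mul_le_mul_right _ (by omega)
      calc P + H = (i * C + j + 1) * H := by rw [hP]; ring
      _ ≤ (R * C) * H := Nat.mul_le_mul_right _ h1
      _ = R * C * H := by ring
    rw [harg1, harg2, hflat, PySem.List.slice_natCast_add, ← List.map_drop, ← List.map_take,
      List.range_eq_range', List.drop_range', List.take_range'_of_length_ge (by omega),
      List.range'_eq_map_range, PySem.List.pyRange_one]
    simp only [sub_zero, hH, List.map_map]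
    apply List.map_congr_left
    intro c hc2
    simp only [Function.comp_apply]
    push_cast [hP, ← hchn, ← hcols]
    ring

-- ===== VERDICT (by name: the statement is the Claim_ definition above) =====
theorem make_volume_spec : Claim_equal_make_volume := by
  unfold Claim_equal_make_volume
  intro rows cols channels offset _
  unfold Spec_make_volume make_volume make_volume_alt
  simp only [rangeSlice_eq, outer_fold_eq]
  by_cases hr : rows ≤ 0
  · rw [PySem.List.pyRange_one_eq_nil hr]; simp
  push_neg at hr
  by_cases hc : cols ≤ 0
  · rw [PySem.List.pyRange_one_eq_nil hc, PySem.List.pyRange_one (a := 0) (b := rows)]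
    simp [Function.comp_def, List.map_const']
  · push_neg at hc
    have hlr : (PySem.List.pyRange 0 rows 1).length = rows.toNat := by
      rw [PySem.List.length_pyRange_one]; simp
    have hlc : (PySem.List.pyRange 0 cols 1).length = cols.toNat := by
      rw [PySem.List.length_pyRange_one]; simp
    rw [hlr, hlc, PySem.List.pyRange_one (a := 0) (b := rows)]
    simp only [sub_zero, List.map_map, List.nil_append]
    apply List.map_congr_left
    intro i hi
    simp only [Function.comp_apply, zero_add]
    rw [PySem.List.pyRange_one (a := 0) (b := cols)]
    simp only [sub_zero, List.map_map]
    apply List.map_congr_left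
    intro j hj
    simp only [Function.comp_apply, zero_add]
    rw [List.mem_range] at hi hj
    have := slice_flat_eq rows cols channels offset hr hc i j hi hj
    symm
    convert this using 4 <;> first
      | rfl
      | (push_cast; ring)
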